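-- pv_equiv track=rewrite | github.com/AhmedHashim27/Uber-Career-Prep-Homework-Ahmed-Hashim | Assignment4/q4.py | generate_catalan_numbers
-- ===== SOURCE A (Python) =====
-- def generate_catalan_numbers(n):
--     if n < 0:
--         return []
--
--     catalan = [0] * (n + 1)
--     catalan[0] = 1
--
--     for i in range(1, n + 1):
--         catalan[i] = 0
--         for j in range(i):
--             catalan[i] += catalan[j] * catalan[i - j - 1]
--
--     return catalan
-- ===== SOURCE B (Python) =====
-- def generate_catalan_numbers(n):
--     if n < 0:
--         return []
--     res = [1]
--     c = 1
--     for i in range(n):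
--         c = c * 2 * (2 * i + 1) // (i + 2)
--         res.append(c)
--     return res
-- ===== Notes on version B (the rewrite author's own statement) =====
-- stated objective: faster
-- what changed: Replaces the quadratic convolution (inner loop summing catalan[j]*catalan[i-j-1]) by the linear recurrence C[i+1] = C[i]*2*(2i+1) // (i+2), an exact integer division, computing each entry in O(1) big-int operations.
import Mathlib
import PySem

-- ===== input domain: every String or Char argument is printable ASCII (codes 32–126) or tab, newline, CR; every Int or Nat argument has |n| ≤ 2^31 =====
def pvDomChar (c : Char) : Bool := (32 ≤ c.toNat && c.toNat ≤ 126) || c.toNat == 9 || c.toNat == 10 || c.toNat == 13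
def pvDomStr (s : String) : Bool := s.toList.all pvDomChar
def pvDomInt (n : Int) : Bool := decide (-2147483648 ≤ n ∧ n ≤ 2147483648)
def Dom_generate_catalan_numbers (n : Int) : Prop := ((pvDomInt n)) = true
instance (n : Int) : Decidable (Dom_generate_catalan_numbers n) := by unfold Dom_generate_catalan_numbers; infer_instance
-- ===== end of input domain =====

-- B replaces A's quadratic convolution by the linear recurrence
-- C[i+1] = C[i]*2*(2i+1) // (i+2) (exact integer division); same return value.

-- ===== PORT A =====
-- inner loop: 'for j in range(i): catalan[i] += catalan[j] * catalan[i-j-1]'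
-- (indices j and i-j-1 are always nonnegative and in range here, so
--  List.getD with .toNat is exact for Python's catalan[...] reads)
def pvInnerA (cat : List Int) (i : Int) : Int :=
  (PySem.List.pyRange 0 i 1).foldl
    (fun acc j => acc + cat.getD j.toNat 0 * cat.getD (i - j - 1).toNat 0) 0

def generate_catalan_numbers (n : Int) : List Int :=
  if n < 0 then []
  else
    -- catalan = [0]*(n+1); catalan[0] = 1
    let init := (List.replicate (n + 1).toNat (0 : Int)).set 0 1
    -- for i in range(1, n+1): catalan[i] = <inner loop>
    (PySem.List.pyRange 1 (n + 1) 1).foldl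
      (fun cat i => cat.set i.toNat (pvInnerA cat i)) init

-- ===== PORT B =====
def pvStepB (st : List Int × Int) (i : Int) : List Int × Int :=
  let c := PySem.Int.floordiv (st.2 * 2 * (2 * i + 1)) (i + 2)
  (st.1 ++ [c], c)

def generate_catalan_numbers_alt (n : Int) : List Int :=
  if n < 0 then []
  else ((PySem.List.pyRange 0 n 1).foldl pvStepB ([1], 1)).1

-- ===== PRECONDITION & SPEC =====
def Spec_generate_catalan_numbers (n : Int) (out : List Int) : Prop := out = generate_catalan_numbers_alt n
instance (n : Int) (out : List Int) : Decidable (Spec_generate_catalan_numbers n out) := by unfold Spec_generate_catalan_numbers; infer_instance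

-- ===== CLAIM (what is proved, stated in full; the proofs are below) =====
def Claim_equal_generate_catalan_numbers : Prop := ∀ (n : Int), Dom_generate_catalan_numbers n → Spec_generate_catalan_numbers n (generate_catalan_numbers n)

-- ===== LEMMAS AND PROOFS =====

-- the common value of both programs' i-th entry
def catZ (i : ℕ) : Int := (catalan i : Int)

-- the linear recurrence, over ℕ, derived from Mathlib's catalan/centralBinom facts
theorem catalan_linear_rec (k : ℕ) :
    (k + 2) * catalan (k + 1) = 2 * (2 * k + 1) * catalan k := by
  have h1 : (k + 1 + 1) * catalan (k + 1) = Nat.centralBinom (k + 1) :=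
    succ_mul_catalan_eq_centralBinom (k + 1)
  have h2 : (k + 1) * Nat.centralBinom (k + 1) = 2 * (2 * k + 1) * Nat.centralBinom k :=
    Nat.succ_mul_centralBinom_succ k
  have h3 : (k + 1) * catalan k = Nat.centralBinom k :=
    succ_mul_catalan_eq_centralBinom k
  apply Nat.eq_of_mul_eq_mul_left (Nat.succ_pos k)
  calc (k + 1) * ((k + 2) * catalan (k + 1))
      = (k + 1) * Nat.centralBinom (k + 1) := by rw [← h1]
    _ = 2 * (2 * k + 1) * Nat.centralBinom k := h2
    _ = 2 * (2 * k + 1) * ((k + 1) * catalan k) := by rw [h3]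
    _ = (k + 1) * (2 * (2 * k + 1) * catalan k) := by ring

-- B's update step is exact division and lands on the next Catalan number
theorem stepB_catalan (k : ℕ) :
    PySem.Int.floordiv (catZ k * 2 * (2 * (k : Int) + 1)) ((k : Int) + 2) = catZ (k + 1) := by
  have hrec : ((k : Int) + 2) * catZ (k + 1) = catZ k * 2 * (2 * (k : Int) + 1) := by
    have h : ((k : Int) + 2) * (catalan (k + 1) : Int)
        = 2 * (2 * (k : Int) + 1) * (catalan k : Int) := by
      exact_mod_cast catalan_linear_rec k
    unfold catZ; linarith
  rw [PySem.Int.floordiv_eq_ediv_of_pos (by positivity), ← hrec,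
    Int.mul_ediv_cancel_left _ (by positivity)]

theorem foldl_add_eq_sum (f : ℕ → ℤ) (l : List ℕ) (a : ℤ) :
    l.foldl (fun acc j => acc + f j) a = a + (l.map f).sum := by
  induction l generalizing a with
  | nil => simp
  | cons x xs ih => simp [ih, add_assoc]

theorem sum_map_range (f : ℕ → ℤ) (n : ℕ) :
    ((List.range n).map f).sum = ∑ i ∈ Finset.range n, f i := by
  induction n with
  | zero => simp
  | succ m ih => simp [List.range_succ, Finset.sum_range_succ, ih]

theorem set_append_length (xs t : List ℤ) (v w : ℤ) :
    (xs ++ w :: t).set xs.length v = xs ++ v :: t := by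
  induction xs with
  | nil => simp
  | cons x l ih => simp [ih]

-- the state of A's outer loop during the convolution: computed prefix ++ zeros
theorem innerA_eval (k N : ℕ) (_hk : k ≤ N) :
    pvInnerA ((List.range (k + 1)).map catZ ++ List.replicate (N - k) 0) (1 + (k : Int))
      = catZ (k + 1) := by
  unfold pvInnerA
  have hb : (1 : Int) + (k : Int) = ((k + 1 : ℕ) : Int) := by push_cast; ring
  rw [hb, PySem.List.pyRange_zero_natCast]
  rw [List.foldl_map]
  have hget : ∀ j : ℕ, j < k + 1 →
      ((List.range (k + 1)).map catZ ++ List.replicate (N - k) 0).getD j 0 = catZ j := by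
    intro j hj
    rw [List.getD_eq_getElem _ _ (by simp; omega),
      List.getElem_append_left (by simpa using hj)]
    simp
  have hcong : (List.range (k + 1)).foldl
      (fun acc j => acc +
        ((List.range (k + 1)).map catZ ++ List.replicate (N - k) 0).getD ((j : Int)).toNat 0 *
        ((List.range (k + 1)).map catZ ++ List.replicate (N - k) 0).getD
          (((k + 1 : ℕ) : Int) - (j : Int) - 1).toNat 0) 0
      = (List.range (k + 1)).foldl (fun acc j => acc + catZ j * catZ (k - j)) 0 := by
    refine PySem.List.foldl_congr_mem _ _ _ _ ?_
    intro acc j hj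
    have hjk : j < k + 1 := List.mem_range.mp hj
    have h1 : ((j : Int)).toNat = j := Int.toNat_natCast j
    have h2 : (((k + 1 : ℕ) : Int) - (j : Int) - 1).toNat = k - j := by omega
    rw [h1, h2, hget j hjk, hget (k - j) (by omega)]
  rw [hcong, foldl_add_eq_sum, sum_map_range, zero_add]
  unfold catZ
  rw [catalan_succ k]
  push_cast [Finset.sum_range]
  rfl

-- A's outer-loop invariant
theorem outerA_inv (N k : ℕ) (hk : k ≤ N) :
    (PySem.List.pyRange 1 (1 + (k : Int)) 1).foldl
        (fun cat i => cat.set i.toNat (pvInnerA cat i))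
        ((List.replicate (N + 1) (0 : Int)).set 0 1)
      = (List.range (k + 1)).map catZ ++ List.replicate (N - k) 0 := by
  induction k with
  | zero =>
    rw [PySem.List.pyRange_one_eq_nil (by norm_num)]
    simp [List.replicate_succ, List.range_succ, catZ]
  | succ m ih =>
    have hm : m ≤ N := by omega
    have hb : (1 : Int) + ((m + 1 : ℕ) : Int) = (1 + (m : Int)) + 1 := by push_cast; ring
    rw [hb, PySem.List.pyRange_one_succ_right (by omega), List.foldl_append, ih hm]
    simp only [List.foldl_cons, List.foldl_nil]
    rw [innerA_eval m N hm]
    have ht : ((1 : Int) + (m : Int)).toNat = m + 1 := by omega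
    have hrep : List.replicate (N - m) (0 : Int) = 0 :: List.replicate (N - (m + 1)) 0 := by
      have : N - m = (N - (m + 1)) + 1 := by omega
      rw [this, List.replicate_succ]
    rw [ht, hrep]
    have hset := set_append_length ((List.range (m + 1)).map catZ)
      (List.replicate (N - (m + 1)) 0) (catZ (m + 1)) 0
    simp only [List.length_map, List.length_range] at hset
    rw [hset]
    simp [List.range_succ]

-- B's loop invariant
theorem foldB_inv (m : ℕ) :
    (PySem.List.pyRange 0 (m : Int) 1).foldl pvStepB ([1], 1)
      = ((List.range (m + 1)).map catZ, catZ m) := by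
  induction m with
  | zero =>
    rw [PySem.List.pyRange_one_eq_nil (by norm_num)]
    simp [List.range_succ, catZ]
  | succ m ih =>
    have hb : ((m + 1 : ℕ) : Int) = (m : Int) + 1 := by push_cast; ring
    rw [hb, PySem.List.pyRange_one_succ_right (by omega), List.foldl_append, ih]
    simp only [List.foldl_cons, List.foldl_nil, pvStepB]
    rw [stepB_catalan m]
    simp [List.range_succ]

-- ===== VERDICT (by name: the statement is the Claim_ definition above) =====
theorem generate_catalan_numbers_spec : Claim_equal_generate_catalan_numbers := by
  intro n _
  unfold Spec_generate_catalan_numbers generate_catalan_numbers generate_catalan_numbers_alt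
  by_cases hn : n < 0
  · simp [hn]
  · simp only [hn, if_false]
    rw [not_lt] at hn
    set N := n.toNat with hN
    have hn1 : n + 1 = 1 + (N : Int) := by omega
    have hn0 : n = (N : Int) := by omega
    have ht : (n + 1).toNat = N + 1 := by omega
    rw [ht, hn1, hn0, outerA_inv N N le_rfl, foldB_inv N]
    simp
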